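-- pv_equiv track=rewrite | github.com/TheoLee021/LeetCode | ConsecutiveCharacter4.py | encode_bigrams
-- ===== SOURCE A (Python) =====
-- def encode_bigrams(s):
--     # Chunk the string in pairs of characters (The last one can be a single character)
--     chunks = [s[i:i+2] for i in range(0, len(s), 2)]
--
--     output = []
--     curr = None
--     count = 0
--
--     for chunk in chunks:
--         if chunk == curr:
--             count += 1
--         else:
--             if curr is not None:
--                 output.append(f"{curr}{count}")
--             curr = chunk
--             count = 1
--
--     if curr is not None:
--         output.append(f"{curr}{count}")
--
--     return ''.join(output)
-- ===== SOURCE B (Python) =====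
-- def encode_bigrams(s):
--     # Two-pointer run scanner over the bigram chunks: for each run find its end
--     # directly, no curr/count state machine and no final flush.
--     chunks = [s[i:i+2] for i in range(0, len(s), 2)]
--     out = []
--     i = 0
--     n = len(chunks)
--     while i < n:
--         j = i + 1
--         while j < n and chunks[j] == chunks[i]:
--             j += 1
--         out.append(f"{chunks[i]}{j - i}")
--         i = j
--     return ''.join(out)
-- ===== Notes on version B (the rewrite author's own statement) =====
-- stated objective: alternative
-- what changed: Replaces A's curr/count state machine with an end-of-loop flush by a two-pointer run scanner that finds each run's end directly and emits it immediately.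
import Mathlib
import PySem

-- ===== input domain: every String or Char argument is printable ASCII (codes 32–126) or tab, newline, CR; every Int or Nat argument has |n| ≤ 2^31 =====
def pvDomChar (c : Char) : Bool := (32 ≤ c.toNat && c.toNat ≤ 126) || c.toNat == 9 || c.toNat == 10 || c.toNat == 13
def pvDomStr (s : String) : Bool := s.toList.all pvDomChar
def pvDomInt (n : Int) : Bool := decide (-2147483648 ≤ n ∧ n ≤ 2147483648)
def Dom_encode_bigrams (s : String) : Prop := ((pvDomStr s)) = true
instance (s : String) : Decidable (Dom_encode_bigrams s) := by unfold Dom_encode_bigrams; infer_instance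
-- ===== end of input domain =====

-- B replaces A's curr/count state machine (with its end-of-loop flush) by a
-- two-pointer run scanner over the same bigram chunk list (objective: alternative).

-- ===== PORT A =====

-- f"{curr}{count}"
def pvFmtA (curr : List Char) (count : Int) : List Char :=
  curr ++ PySem.Int.toChars count

-- the loop body of A: state (output, curr, count)
def pvStepA (st : List (List Char) × Option (List Char) × Int) (chunk : List Char) :
    List (List Char) × Option (List Char) × Int :=
  match st with
  | (output, curr, count) =>
    if some chunk == curr then (output, curr, count + 1)
    else
      match curr with
      | some c => (output ++ [pvFmtA c count], some chunk, 1)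
      | none => (output, some chunk, 1)

-- the flush after A's loop ("if curr is not None: output.append(...)")
def pvFinishA (st : List (List Char) × Option (List Char) × Int) : List (List Char) :=
  match st.2.1 with
  | some c => st.1 ++ [pvFmtA c st.2.2]
  | none => st.1

def encode_bigrams (s : String) : String :=
  let cs := s.toList
  let chunks := (PySem.List.pyRange 0 cs.length 2).map
      (fun i => PySem.List.slice cs (some i) (some (i + 2)))
  String.ofList (PySem.Chars.join [] (pvFinishA (chunks.foldl pvStepA ([], none, 0))))

-- ===== PORT B =====

-- the two-pointer scan of Source B: the inner while counts the run (takeWhile),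
-- the outer loop jumps past its end (drop)
def pvRunsB : List (List Char) → List (List Char)
  | [] => []
  | c :: rest =>
    (c ++ PySem.Int.toChars (1 + ((rest.takeWhile (fun x => x == c)).length : Int))) ::
      pvRunsB (rest.drop (rest.takeWhile (fun x => x == c)).length)
termination_by l => l.length
decreasing_by simp

def encode_bigrams_alt (s : String) : String :=
  let cs := s.toList
  let chunks := (PySem.List.pyRange 0 cs.length 2).map
      (fun i => PySem.List.slice cs (some i) (some (i + 2)))
  String.ofList (PySem.Chars.join [] (pvRunsB chunks))

-- ===== PRECONDITION & SPEC =====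
def Spec_encode_bigrams (s : String) (out : String) : Prop := out = encode_bigrams_alt s
instance (s : String) (out : String) : Decidable (Spec_encode_bigrams s out) := by unfold Spec_encode_bigrams; infer_instance

-- ===== CLAIM (what is proved, stated in full; the proofs are below) =====
def Claim_equal_encode_bigrams : Prop := ∀ (s : String), Dom_encode_bigrams s → Spec_encode_bigrams s (encode_bigrams s)

-- ===== LEMMAS AND PROOFS =====

-- invariant of A's loop: started with an open run (curr = c, count = k), the
-- flushed result is B's run decomposition of the rest, the first count shifted by k
lemma pvLoopA (l : List (List Char)) (out : List (List Char)) (c : List Char) (k : Int) :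
    pvFinishA (l.foldl pvStepA (out, some c, k))
      = out ++ (c ++ PySem.Int.toChars (k + ((l.takeWhile (fun x => x == c)).length : Int)))
          :: pvRunsB (l.drop (l.takeWhile (fun x => x == c)).length) := by
  induction l generalizing out c k with
  | nil => simp [pvFinishA, pvFmtA, pvRunsB.eq_1]
  | cons h t ih =>
    by_cases hc : h = c
    · subst hc
      have hbe : (some h == some h) = true := by simp
      simp only [List.foldl_cons, pvStepA, hbe, if_true, List.takeWhile_cons, BEq.rfl]
      rw [ih]
      have harith : k + 1 + ((t.takeWhile (fun x => x == h)).length : Int)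
           = k + (((t.takeWhile (fun x => x == h)).length : Int) + 1) := by ring
      simp [harith]
    · have hbe : (some h == some c) = false := by simp [hc]
      simp only [List.foldl_cons, pvStepA, hbe, Bool.false_eq_true, if_false]
      rw [ih]
      have htw : (h :: t).takeWhile (fun x => x == c) = [] := by
        simp [hc]
      rw [htw]
      simp only [List.length_nil, List.drop_zero]
      rw [pvRunsB.eq_2]
      simp [pvFmtA]

lemma pvMain (chunks : List (List Char)) :
    pvFinishA (chunks.foldl pvStepA ([], none, 0)) = pvRunsB chunks := by
  cases chunks with
  | nil => simp [pvFinishA, pvRunsB.eq_1]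
  | cons c rest =>
    have h1 : pvStepA ([], none, 0) c = ([], some c, 1) := by
      simp [pvStepA]
    rw [List.foldl_cons, h1, pvLoopA, pvRunsB.eq_2]
    simp

-- ===== VERDICT (by name: the statement is the Claim_ definition above) =====
theorem encode_bigrams_spec : Claim_equal_encode_bigrams := by
  intro s _
  unfold Spec_encode_bigrams encode_bigrams encode_bigrams_alt
  exact congrArg (fun o => String.ofList (PySem.Chars.join [] o)) (pvMain _)
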